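-- pv_equiv track=rewrite | github.com/28Ln/ProtoLink | src/protolink/core/extensions.py | _capability_class
-- ===== SOURCE A (Python) =====
-- CLASS_A_CAPABILITIES = {
--     "protocol_parser",
--     "data_transform",
--     "import_export_codec",
--     "export_codec",
--     "payload_inspector",
-- }
--
-- CLASS_B_CAPABILITIES = {
--     "read_only_diagnostic",
--     "report_export",
--     "workspace_asset_analysis",
-- }
--
-- CLASS_C_CAPABILITIES = {
--     "transport_adapter",
--     "automation_hook",
--     "script_host_integration",
--     "ui_surface",
-- }
--
-- def _capability_class(capabilities: tuple[str, ...]) -> str: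
--     if not capabilities:
--         return "unsupported"
--     if any(capability in CLASS_C_CAPABILITIES for capability in capabilities):
--         return "class_c"
--     if any(capability in CLASS_B_CAPABILITIES for capability in capabilities):
--         return "class_b"
--     if all(capability in CLASS_A_CAPABILITIES for capability in capabilities):
--         return "class_a"
--     return "unsupported"
-- ===== SOURCE B (Python) =====
-- CLASS_A_CAPABILITIES = {
--     "protocol_parser",
--     "data_transform",
--     "import_export_codec",
--     "export_codec",
--     "payload_inspector",
-- }
--
-- CLASS_B_CAPABILITIES = {
--     "read_only_diagnostic",
--     "report_export",
--     "workspace_asset_analysis",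
-- }
--
-- CLASS_C_CAPABILITIES = {
--     "transport_adapter",
--     "automation_hook",
--     "script_host_integration",
--     "ui_surface",
-- }
--
-- # Each capability is scored into a 4-level lattice and the whole tuple's class is
-- # simply the MAXIMUM score, looked up in a name table:
-- #   class_a = 0 < unsupported = 1 < class_b = 2 < class_c = 3.
-- # This is correct because the original priority rules are exactly "take the worst
-- # (highest) tier present": any C-cap wins, else any B-cap, else a single unknown
-- # cap ruins class_a.
-- _SCORE = {}
-- for _cap in CLASS_A_CAPABILITIES:
--     _SCORE[_cap] = 0
-- for _cap in CLASS_B_CAPABILITIES: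
--     _SCORE[_cap] = 2
-- for _cap in CLASS_C_CAPABILITIES:
--     _SCORE[_cap] = 3
--
-- _CLASS_NAMES = ("class_a", "unsupported", "class_b", "class_c")
--
--
-- def _capability_class(capabilities: tuple[str, ...]) -> str:
--     if not capabilities:
--         return "unsupported"
--     return _CLASS_NAMES[max(_SCORE.get(cap, 1) for cap in capabilities)]
-- ===== Notes on version B (the rewrite author's own statement) =====
-- stated objective: simpler
-- what changed: Replaces A's prioritized any/any/all membership scans over three sets with a numeric lattice: one merged score table maps each capability to a tier (class_a=0 < unsupported=1 < class_b=2 < class_c=3), and the result is just the maximum score used as an index into a name table.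
import Mathlib
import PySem

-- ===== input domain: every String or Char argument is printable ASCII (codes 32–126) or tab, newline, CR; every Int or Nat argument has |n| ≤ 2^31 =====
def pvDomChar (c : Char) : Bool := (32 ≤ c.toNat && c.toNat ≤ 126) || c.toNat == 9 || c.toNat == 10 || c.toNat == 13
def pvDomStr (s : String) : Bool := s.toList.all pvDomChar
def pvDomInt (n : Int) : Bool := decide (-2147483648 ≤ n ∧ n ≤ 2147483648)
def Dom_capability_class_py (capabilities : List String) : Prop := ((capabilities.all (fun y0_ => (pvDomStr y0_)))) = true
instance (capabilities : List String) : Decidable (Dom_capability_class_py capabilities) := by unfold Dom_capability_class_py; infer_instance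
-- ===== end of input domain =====

-- B replaces A's prioritized any/any/all membership scans by scoring each capability into a
-- 4-level lattice (class_a=0 < unsupported=1 < class_b=2 < class_c=3) via one merged score
-- table and taking the maximum score as an index into a name table; objective: simpler.
-- ===== PORT A =====
def pvInA (s : String) : Bool :=
  s == "protocol_parser" || s == "data_transform" || s == "import_export_codec" ||
  s == "export_codec" || s == "payload_inspector"
def pvInB (s : String) : Bool :=
  s == "read_only_diagnostic" || s == "report_export" || s == "workspace_asset_analysis"
def pvInC (s : String) : Bool :=
  s == "transport_adapter" || s == "automation_hook" || s == "script_host_integration" ||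
  s == "ui_surface"

def capability_class_py (capabilities : List String) : String :=
  if capabilities = [] then "unsupported"
  else if capabilities.any (fun c => pvInC c) then "class_c"
  else if capabilities.any (fun c => pvInB c) then "class_b"
  else if capabilities.all (fun c => pvInA c) then "class_a"
  else "unsupported"

-- ===== PORT B =====
-- the _SCORE dict (set iteration order does not affect the resulting mapping: keys are distinct)
def pvScoreDict : PySem.Dict String Nat := PySem.Dict.mk
  [("protocol_parser", 0), ("data_transform", 0), ("import_export_codec", 0),
   ("export_codec", 0), ("payload_inspector", 0),
   ("read_only_diagnostic", 2), ("report_export", 2), ("workspace_asset_analysis", 2),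
   ("transport_adapter", 3), ("automation_hook", 3), ("script_host_integration", 3),
   ("ui_surface", 3)]

def pvClassNames : List String := ["class_a", "unsupported", "class_b", "class_c"]

def capability_class_py_alt (capabilities : List String) : String :=
  if capabilities = [] then "unsupported"
  else
    -- max(generator) over the nonempty list, then tuple indexing (index always in range)
    (PySem.List.pyGetD pvClassNames
      (Int.ofNat ((PySem.List.max? (capabilities.map (fun cap => pvScoreDict.getD cap 1))
        (fun y => y)).getD 0)) "unsupported")

-- ===== PRECONDITION & SPEC =====
def Spec_capability_class_py (capabilities : List String) (out : String) : Prop := out = capability_class_py_alt capabilities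
instance (capabilities : List String) (out : String) : Decidable (Spec_capability_class_py capabilities out) := by unfold Spec_capability_class_py; infer_instance

-- ===== CLAIM (what is proved, stated in full; the proofs are below) =====
def Claim_equal_capability_class_py : Prop := ∀ (capabilities : List String), Dom_capability_class_py capabilities → Spec_capability_class_py capabilities (capability_class_py capabilities)

-- ===== LEMMAS AND PROOFS =====

-- score of one capability, expressed through A's membership tests
def pvG (c : String) : Nat := if pvInC c then 3 else if pvInB c then 2 else if pvInA c then 0 else 1
lemma pvG_def (c : String) : pvG c = if pvInC c then 3 else if pvInB c then 2 else if pvInA c then 0 else 1 := rfl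

set_option maxHeartbeats 1000000 in
lemma pvScore_eq (s : String) : pvScoreDict.getD s 1 = pvG s := by
  rw [PySem.Dict.getD_eq_get?_getD, pvG_def]
  simp only [pvScoreDict]
  repeat rw [PySem.Dict.get?_mk_cons]
  simp only [pvInA, pvInB, pvInC, beq_iff_eq, Bool.or_eq_true]
  split_ifs <;> (try simp_all) <;> (try simp [PySem.Dict.get?]) <;> subst_vars <;>
    (try simp_all) <;> simp_all [eq_comm]

-- A's flag chain as a numeric tier
def pvT (xs : List String) : Nat :=
  if xs.any (fun c => pvInC c) then 3
  else if xs.any (fun c => pvInB c) then 2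
  else if xs.all (fun c => pvInA c) then 0 else 1

lemma pvT_cons (y : String) (ys : List String) : max (pvG y) (pvT ys) = pvT (y :: ys) := by
  simp only [pvG, pvT, List.any_cons, List.all_cons]
  rcases Bool.eq_false_or_eq_true (pvInC y) with hcy | hcy <;>
    rcases Bool.eq_false_or_eq_true (pvInB y) with hby | hby <;>
    rcases Bool.eq_false_or_eq_true (pvInA y) with hay | hay <;>
    rcases Bool.eq_false_or_eq_true (ys.any (fun c => pvInC c)) with hc | hc <;>
    rcases Bool.eq_false_or_eq_true (ys.any (fun c => pvInB c)) with hb | hb <;>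
    rcases Bool.eq_false_or_eq_true (ys.all (fun c => pvInA c)) with ha | ha <;>
    simp only [hcy, hby, hay, hc, hb, ha] <;> simp

-- the running-max of the scores computes the tier
lemma pvFold (xs : List String) (a : Nat) : (xs.map pvG).foldl max a = max a (pvT xs) := by
  induction xs generalizing a with
  | nil => simp [pvT]
  | cons y ys ih =>
    simp only [List.map_cons, List.foldl_cons, ih, ← pvT_cons]
    omega

-- ===== VERDICT (by name: the statement is the Claim_ definition above) =====
theorem capability_class_py_spec : Claim_equal_capability_class_py := by
  intro caps _
  unfold Spec_capability_class_py capability_class_py capability_class_py_alt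
  cases caps with
  | nil => simp
  | cons x xs =>
    rw [List.map_cons, PySem.List.max?_id_cons]
    simp only [Option.getD_some, pvScore_eq, pvFold, pvT_cons]
    have hne : x :: xs ≠ [] := by simp
    rw [if_neg hne, if_neg hne]
    unfold pvT
    split_ifs <;> rfl
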